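-- pv_equiv track=rewrite | github.com/teamdev-genplus/clase-streamlit | funciones_S9.py | superponer_rangos
-- ===== SOURCE A (Python) =====
-- def superponer_rangos(estaciones):
--     inicios = []
--     finales = []
--     for estacion in estaciones:
--         inicios.append(estacion['rango'][0])
--         finales.append(estacion['rango'][1])
--     # Rango de intersección
--     rango_inicio = max(inicios)
--     rango_fin = min(finales)
--     return [rango_inicio, rango_fin]
-- ===== SOURCE B (Python) =====
-- def superponer_rangos(estaciones):
--     rango_inicio = estaciones[0]['rango'][0]
--     rango_fin = estaciones[0]['rango'][1]
--     for estacion in estaciones[1:]: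
--         s = estacion['rango'][0]
--         f = estacion['rango'][1]
--         if s > rango_inicio:
--             rango_inicio = s
--         if f < rango_fin:
--             rango_fin = f
--     return [rango_inicio, rango_fin]
-- ===== Notes on version B (the rewrite author's own statement) =====
-- stated objective: simpler
-- what changed: Replaces building two intermediate lists plus max()/min() calls with a single pass seeded from the first station that keeps running max-of-starts and min-of-ends accumulators; Pre_ excludes empty input and stations whose 'rango' is missing or shorter than 2, on which A raises (ValueError/KeyError/IndexError).
import Mathlib
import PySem

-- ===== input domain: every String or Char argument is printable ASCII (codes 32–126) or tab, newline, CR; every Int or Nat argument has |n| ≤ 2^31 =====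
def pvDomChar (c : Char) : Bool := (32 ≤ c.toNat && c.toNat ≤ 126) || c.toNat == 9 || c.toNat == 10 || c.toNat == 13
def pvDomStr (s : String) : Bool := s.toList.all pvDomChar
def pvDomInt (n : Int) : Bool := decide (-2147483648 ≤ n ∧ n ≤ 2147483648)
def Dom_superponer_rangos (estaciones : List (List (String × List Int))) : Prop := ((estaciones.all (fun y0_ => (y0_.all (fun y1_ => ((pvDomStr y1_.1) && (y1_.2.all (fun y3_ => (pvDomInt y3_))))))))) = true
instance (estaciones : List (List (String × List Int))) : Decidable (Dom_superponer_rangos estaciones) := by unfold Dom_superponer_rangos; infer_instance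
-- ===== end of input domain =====

-- B replaces A's two intermediate lists plus max()/min() with one pass seeded from the
-- first station, keeping running accumulators (objective: simpler).

-- shared primitive accessors: estacion['rango'][0] / [1] (exact where Pre_ holds; .getD only pads the excluded raising inputs)
def pvRango (est : List (String × List Int)) : List Int := (est.lookup "rango").getD []
def pvS (est : List (String × List Int)) : Int := (PySem.List.pyGet? (pvRango est) 0).getD 0
def pvF (est : List (String × List Int)) : Int := (PySem.List.pyGet? (pvRango est) 1).getD 0

-- ===== PORT A =====
def superponer_rangos (estaciones : List (List (String × List Int))) : List Int :=
  -- builds the two lists 'inicios' / 'finales', then max(inicios), min(finales)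
  let p := estaciones.foldl
    (fun (acc : List Int × List Int) est => (acc.1 ++ [pvS est], acc.2 ++ [pvF est]))
    ([], [])
  [(PySem.List.max? p.1 (fun x => x)).getD 0, (PySem.List.min? p.2 (fun x => x)).getD 0]

-- ===== PORT B =====
def superponer_rangos_alt (estaciones : List (List (String × List Int))) : List Int :=
  -- accumulators seeded from estaciones[0], then a single pass over estaciones[1:]
  match estaciones with
  | [] => []  -- Python B raises IndexError here (A raises too); excluded by Pre_
  | e :: rest =>
    let acc := rest.foldl
      (fun (acc : Int × Int) est =>
        let s := pvS est
        let f := pvF est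
        (if s > acc.1 then s else acc.1, if f < acc.2 then f else acc.2))
      (pvS e, pvF e)
    [acc.1, acc.2]

-- ===== PRECONDITION & SPEC =====
-- A raises on empty input (ValueError from max of an empty list) and when some estacion lacks a
-- 'rango' key (KeyError) or its 'rango' has fewer than 2 elements (IndexError); exactly those are excluded.
def Pre_superponer_rangos (estaciones : List (List (String × List Int))) : Prop :=
  estaciones ≠ [] ∧ ∀ est ∈ estaciones, 2 ≤ ((est.lookup "rango").getD []).length
instance (estaciones : List (List (String × List Int))) : Decidable (Pre_superponer_rangos estaciones) := by unfold Pre_superponer_rangos; infer_instance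
def pvWitness_superponer_rangos : (List (List (String × List Int))) := [[("rango", [1, 5])], [("rango", [2, 7])]]

def Spec_superponer_rangos (estaciones : List (List (String × List Int))) (out : List Int) : Prop := out = superponer_rangos_alt estaciones
instance (estaciones : List (List (String × List Int))) (out : List Int) : Decidable (Spec_superponer_rangos estaciones out) := by unfold Spec_superponer_rangos; infer_instance

-- ===== CLAIM =====
def Claim_equal_superponer_rangos : Prop := ∀ (estaciones : List (List (String × List Int))), Dom_superponer_rangos estaciones → Pre_superponer_rangos estaciones → Spec_superponer_rangos estaciones (superponer_rangos estaciones)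

-- ===== LEMMAS AND PROOFS =====

-- A's loop appends pvS/pvF of every element to the two accumulator lists
theorem pvA_fold (l : List (List (String × List Int))) (xs ys : List Int) :
    l.foldl (fun (acc : List Int × List Int) est => (acc.1 ++ [pvS est], acc.2 ++ [pvF est])) (xs, ys)
      = (xs ++ l.map pvS, ys ++ l.map pvF) := by
  induction l generalizing xs ys with
  | nil => simp
  | cons e t ih => simp [List.foldl_cons, ih]

-- B's loop computes running max/min of pvS/pvF
theorem pvB_fold (l : List (List (String × List Int))) (a b : Int) :
    l.foldl (fun (acc : Int × Int) est =>
        let s := pvS est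
        let f := pvF est
        (if s > acc.1 then s else acc.1, if f < acc.2 then f else acc.2)) (a, b)
      = (l.foldl (fun acc est => max acc (pvS est)) a, l.foldl (fun acc est => min acc (pvF est)) b) := by
  induction l generalizing a b with
  | nil => simp
  | cons e t ih =>
    simp only [List.foldl_cons, ih]
    congr 2
    · rcases le_or_gt (pvS e) a with h | h
      · simp [not_lt.mpr h, max_eq_left h]
      · simp [h, max_eq_right h.le]
    · rcases le_or_gt b (pvF e) with h | h
      · simp [not_lt.mpr h, min_eq_left h]
      · simp [h, min_eq_right h.le]

-- ===== VERDICT =====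
theorem superponer_rangos_spec : Claim_equal_superponer_rangos := by
  intro estaciones _ hpre
  unfold Spec_superponer_rangos superponer_rangos superponer_rangos_alt
  obtain ⟨hne, -⟩ := hpre
  obtain ⟨e, t, rfl⟩ := List.exists_cons_of_ne_nil hne
  simp only [List.foldl_cons, pvA_fold, pvB_fold]
  simp [PySem.List.max?_id_cons, PySem.List.min?_id_cons, List.foldl_map]
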